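-- pv_equiv track=rewrite | github.com/leandrocalesso/projeto_megasena_python | PythonApplication1/PythonApplication1.py | func_filtro_colunas
-- ===== SOURCE A (Python) =====
-- def func_filtro_colunas ( lista_sequencia ) :
--
--     matriz_colunas_volante = { 1: [ 1, 11, 21, 31, 41, 51 ],
--                                2: [ 2, 12, 22, 32, 42, 52 ],
--                                3: [ 3, 13, 23, 33, 43, 53 ],
--                                4: [ 4, 14, 24, 34, 44, 54 ],
--                                5: [ 5, 15, 25, 35, 45, 55 ],
--                                6: [ 6, 16, 26, 36, 46, 56 ],
--                                7: [ 7, 17, 27, 37, 47, 57 ],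
--                                8: [ 8, 18, 28, 38, 48, 58 ],
--                                9: [ 9, 19, 29, 39, 49, 59 ],
--                               10: [ 10, 20, 30, 40, 50, 60 ] }
--
--     res         = 0
--     cont_coluna = 0
--     retorno     = False
--     for _i in range( 1, len ( matriz_colunas_volante ) + 1 ) :
--
--        res = len ( set ( matriz_colunas_volante [ _i ] ) & set ( lista_sequencia  ) )
--        if res != 0 : cont_coluna += 1
--
--     if cont_coluna >= 4 and cont_coluna <= 6 :
--       retorno = True
--
--     return retorno
-- ===== SOURCE B (Python) =====
-- def func_filtro_colunas(lista_sequencia):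
--     colunas = {((n - 1) % 10) + 1 for n in lista_sequencia if 1 <= n <= 60}
--     return 4 <= len(colunas) <= 6
-- ===== Notes on version B (the rewrite author's own statement) =====
-- stated objective: simpler
-- what changed: Instead of looping over the 10 hard-coded columns and intersecting each with a freshly built set of the whole input, B makes one pass over the input, mapping each in-range number to its column id ((n-1)%10+1) into a set, and checks 4 <= len <= 6.
import Mathlib
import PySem

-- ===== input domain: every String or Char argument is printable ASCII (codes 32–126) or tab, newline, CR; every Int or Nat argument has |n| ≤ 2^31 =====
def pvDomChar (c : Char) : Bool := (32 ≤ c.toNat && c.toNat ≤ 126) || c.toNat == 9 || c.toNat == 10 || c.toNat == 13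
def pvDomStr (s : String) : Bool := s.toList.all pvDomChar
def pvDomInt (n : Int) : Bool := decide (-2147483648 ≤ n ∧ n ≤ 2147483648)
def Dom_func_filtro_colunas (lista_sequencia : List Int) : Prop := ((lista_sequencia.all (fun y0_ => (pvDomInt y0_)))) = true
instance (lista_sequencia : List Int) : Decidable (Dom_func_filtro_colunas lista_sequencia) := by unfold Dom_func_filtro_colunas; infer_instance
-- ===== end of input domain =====

-- B replaces A's loop over the 10 hard-coded columns (one set-intersection of the whole
-- input per column) by a single pass mapping each in-range number to its column id into a
-- set and checking 4 <= len <= 6; objective: simpler.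

-- ===== PORT A =====
-- the dict literal of A (hoisted to a named constant; contents unchanged)
def pvMatrizA : PySem.Dict Int (List Int) :=
  PySem.Dict.ofList
  [ (1, [1, 11, 21, 31, 41, 51]),
    (2, [2, 12, 22, 32, 42, 52]),
    (3, [3, 13, 23, 33, 43, 53]),
    (4, [4, 14, 24, 34, 44, 54]),
    (5, [5, 15, 25, 35, 45, 55]),
    (6, [6, 16, 26, 36, 46, 56]),
    (7, [7, 17, 27, 37, 47, 57]),
    (8, [8, 18, 28, 38, 48, 58]),
    (9, [9, 19, 29, 39, 49, 59]),
    (10, [10, 20, 30, 40, 50, 60]) ]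

def func_filtro_colunas (lista_sequencia : List Int) : Bool :=
  -- state = (res, cont_coluna); matriz[_i] always hits (keys are exactly 1..10), ported as get?/getD
  let st : Int × Int :=
    (PySem.List.pyRange 1 ((pvMatrizA.size : Int) + 1) 1).foldl
      (fun st _i =>
        let res : Int :=
          PySem.Set.len (PySem.Set.inter
            (PySem.Set.ofList ((PySem.Dict.get? pvMatrizA _i).getD []))
            (PySem.Set.ofList lista_sequencia))
        if res ≠ 0 then (res, st.2 + 1) else (res, st.2))
      (0, 0)
  let retorno : Bool := false
  if st.2 ≥ 4 ∧ st.2 ≤ 6 then true else retorno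

-- ===== PORT B =====
def func_filtro_colunas_alt (lista_sequencia : List Int) : Bool :=
  let colunas : PySem.Set Int :=
    PySem.Set.ofList
      ((lista_sequencia.filter (fun n => decide (1 ≤ n ∧ n ≤ 60))).map
        (fun n => PySem.Int.mod (n - 1) 10 + 1))
  decide (4 ≤ PySem.Set.len colunas) && decide (PySem.Set.len colunas ≤ 6)

-- ===== PRECONDITION & SPEC =====
def Spec_func_filtro_colunas (lista_sequencia : List Int) (out : Bool) : Prop := out = func_filtro_colunas_alt lista_sequencia
instance (lista_sequencia : List Int) (out : Bool) : Decidable (Spec_func_filtro_colunas lista_sequencia out) := by unfold Spec_func_filtro_colunas; infer_instance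

-- ===== CLAIM (what is proved, stated in full; the proofs are below) =====
def Claim_equal_func_filtro_colunas : Prop := ∀ (lista_sequencia : List Int), Dom_func_filtro_colunas lista_sequencia → Spec_func_filtro_colunas lista_sequencia (func_filtro_colunas lista_sequencia)

-- ===== LEMMAS AND PROOFS =====

-- B's set of column ids
def pvCols (lista : List Int) : List Int :=
  PySem.Set.ofList
    ((lista.filter (fun n => decide (1 ≤ n ∧ n ≤ 60))).map
      (fun n => PySem.Int.mod (n - 1) 10 + 1))

theorem pvCols_nodup (lista : List Int) : (pvCols lista).Nodup :=
  PySem.Set.nodup_ofList _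

theorem pvCols_mem (lista : List Int) (i : Int) :
    i ∈ pvCols lista ↔ ∃ n ∈ lista, 1 ≤ n ∧ n ≤ 60 ∧ (n - 1) % 10 + 1 = i := by
  unfold pvCols
  rw [PySem.Set.mem_ofList]
  simp only [List.mem_map, List.mem_filter, decide_eq_true_eq]
  constructor
  · rintro ⟨n, ⟨hn, h1, h60⟩, rfl⟩
    exact ⟨n, hn, h1, h60, by rw [PySem.Int.mod_eq_emod_of_pos (by omega)]⟩
  · rintro ⟨n, hn, h1, h60, hi⟩
    exact ⟨n, ⟨hn, h1, h60⟩, by rw [PySem.Int.mod_eq_emod_of_pos (by omega)]; exact hi⟩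

theorem pvCols_subset (lista : List Int) :
    ∀ i ∈ pvCols lista, i ∈ ([1,2,3,4,5,6,7,8,9,10] : List Int) := by
  intro i hi
  rw [pvCols_mem] at hi
  obtain ⟨n, _, h1, h60, hi⟩ := hi
  have h0 : (0:Int) ≤ (n - 1) % 10 := Int.emod_nonneg _ (by norm_num)
  have h10 : (n - 1) % 10 < 10 := Int.emod_lt_of_pos _ (by norm_num)
  simp only [List.mem_cons, List.not_mem_nil, or_false]
  omega

-- length of B's set = number of i ∈ [1..10] occurring in it
theorem pvCols_len (lista : List Int) :
    (pvCols lista).length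
      = (([1,2,3,4,5,6,7,8,9,10] : List Int).filter
          (fun i => decide (i ∈ pvCols lista))).length := by
  have hperm :
      (([1,2,3,4,5,6,7,8,9,10] : List Int).filter
          (fun i => decide (i ∈ pvCols lista))).Perm (pvCols lista) := by
    rw [List.perm_ext_iff_of_nodup (List.Nodup.filter _ (by decide)) (pvCols_nodup lista)]
    intro a
    simp only [List.mem_filter, decide_eq_true_eq]
    exact ⟨fun h => h.2, fun h => ⟨pvCols_subset lista a h, h⟩⟩
  exact hperm.length_eq.symm

-- A's columns, arithmetically
theorem pvCol_eq :
    ∀ i ∈ ([1,2,3,4,5,6,7,8,9,10] : List Int),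
      (PySem.Dict.get? pvMatrizA i).getD [] = [i, i+10, i+20, i+30, i+40, i+50] := by
  decide

theorem pvCol_bounds : ∀ i ∈ ([1,2,3,4,5,6,7,8,9,10] : List Int), 1 ≤ i ∧ i ≤ 10 := by
  decide

-- per column: A's intersection is nonempty iff the column id occurs in B's set
theorem pvInter_col (lista : List Int) (i : Int)
    (hi : i ∈ ([1,2,3,4,5,6,7,8,9,10] : List Int)) :
    (PySem.Set.len (PySem.Set.inter
        (PySem.Set.ofList ((PySem.Dict.get? pvMatrizA i).getD []))
        (PySem.Set.ofList lista)) ≠ 0)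
      ↔ i ∈ pvCols lista := by
  have hchar : ∀ n : Int, n ∈ (PySem.Dict.get? pvMatrizA i).getD []
      ↔ 1 ≤ n ∧ n ≤ 60 ∧ (n - 1) % 10 + 1 = i := by
    intro n
    rw [pvCol_eq i hi]
    obtain ⟨h1, h10⟩ := pvCol_bounds i hi
    simp only [List.mem_cons, List.not_mem_nil, or_false]
    omega
  rw [pvCols_mem]
  constructor
  · intro h
    have hne : PySem.Set.inter (PySem.Set.ofList ((PySem.Dict.get? pvMatrizA i).getD []))
        (PySem.Set.ofList lista) ≠ [] := by
      intro he
      apply h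
      simp [PySem.Set.len, he]
    obtain ⟨n, hn⟩ := List.exists_mem_of_ne_nil _ hne
    rw [PySem.Set.mem_inter, PySem.Set.mem_ofList, PySem.Set.mem_ofList, hchar] at hn
    exact ⟨n, hn.2, hn.1⟩
  · rintro ⟨n, hl, hc⟩
    have hn : n ∈ PySem.Set.inter (PySem.Set.ofList ((PySem.Dict.get? pvMatrizA i).getD []))
        (PySem.Set.ofList lista) := by
      rw [PySem.Set.mem_inter, PySem.Set.mem_ofList, PySem.Set.mem_ofList, hchar]
      exact ⟨hc, hl⟩
    have hne := List.ne_nil_of_mem hn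
    simpa [PySem.Set.len, Int.natCast_eq_zero, List.length_eq_zero_iff] using hne

-- counting loop: the second component of A's fold counts the columns with nonzero res
theorem pvFoldCount (f : Int → Int) (l : List Int) (st : Int × Int) :
    (l.foldl (fun st i =>
        if f i ≠ 0 then (f i, st.2 + 1) else (f i, st.2)) st).2
      = st.2 + ((l.filter (fun i => decide (f i ≠ 0))).length : Int) := by
  induction l generalizing st with
  | nil => simp
  | cons x xs ih =>
    rw [List.foldl_cons, List.filter_cons]
    by_cases h : f x ≠ 0
    · rw [if_pos h, ih, if_pos (by simpa using h)]
      simp only [List.length_cons]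
      push_cast
      ring
    · rw [if_neg h, ih, if_neg (by simpa using h)]

-- ===== VERDICT (by name: the statement is the Claim_ definition above) =====
theorem func_filtro_colunas_spec : Claim_equal_func_filtro_colunas := by
  intro lista _
  show func_filtro_colunas lista = func_filtro_colunas_alt lista
  have hA : func_filtro_colunas lista =
      (if ((PySem.List.pyRange 1 ((pvMatrizA.size : Int) + 1) 1).foldl
            (fun (st : Int × Int) _i =>
              if PySem.Set.len (PySem.Set.inter
                    (PySem.Set.ofList ((PySem.Dict.get? pvMatrizA _i).getD []))
                    (PySem.Set.ofList lista)) ≠ 0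
              then (PySem.Set.len (PySem.Set.inter
                    (PySem.Set.ofList ((PySem.Dict.get? pvMatrizA _i).getD []))
                    (PySem.Set.ofList lista)), st.2 + 1)
              else (PySem.Set.len (PySem.Set.inter
                    (PySem.Set.ofList ((PySem.Dict.get? pvMatrizA _i).getD []))
                    (PySem.Set.ofList lista)), st.2)) (0, 0)).2 ≥ 4
          ∧ ((PySem.List.pyRange 1 ((pvMatrizA.size : Int) + 1) 1).foldl
            (fun (st : Int × Int) _i =>
              if PySem.Set.len (PySem.Set.inter
                    (PySem.Set.ofList ((PySem.Dict.get? pvMatrizA _i).getD []))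
                    (PySem.Set.ofList lista)) ≠ 0
              then (PySem.Set.len (PySem.Set.inter
                    (PySem.Set.ofList ((PySem.Dict.get? pvMatrizA _i).getD []))
                    (PySem.Set.ofList lista)), st.2 + 1)
              else (PySem.Set.len (PySem.Set.inter
                    (PySem.Set.ofList ((PySem.Dict.get? pvMatrizA _i).getD []))
                    (PySem.Set.ofList lista)), st.2)) (0, 0)).2 ≤ 6
       then true else false) := rfl
  have hB : func_filtro_colunas_alt lista =
      (decide (4 ≤ ((pvCols lista).length : Int)) && decide (((pvCols lista).length : Int) ≤ 6)) := rfl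
  rw [hA, hB]
  have hrange : PySem.List.pyRange 1 ((pvMatrizA.size : Int) + 1) 1
      = ([1,2,3,4,5,6,7,8,9,10] : List Int) := by decide
  rw [hrange, pvFoldCount]
  have hfc : ∀ i ∈ ([1,2,3,4,5,6,7,8,9,10] : List Int),
      decide (PySem.Set.len (PySem.Set.inter
          (PySem.Set.ofList ((PySem.Dict.get? pvMatrizA i).getD []))
          (PySem.Set.ofList lista)) ≠ 0)
        = decide (i ∈ pvCols lista) := by
    intro i hi
    rw [decide_eq_decide]
    exact pvInter_col lista i hi
  rw [List.filter_congr hfc, ← pvCols_len]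
  by_cases h4 : (4:Int) ≤ ((pvCols lista).length : Int) <;>
    by_cases h6 : ((pvCols lista).length : Int) ≤ 6 <;>
    simp [h4, h6]
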